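-- pv_equiv track=rewrite | github.com/YangLiyli131/Leetcode2020 | in_Python/0533 Lonely Pixel II.py | findBlackPixel
-- ===== SOURCE A (Python) =====
-- def findBlackPixel(picture, N):
--     """
--     :type picture: List[List[str]]
--     :type N: int
--     :rtype: int
--     """
--     row, col = len(picture), len(picture[0])
--     nr,nc = [0] * row, [0] * col
--     r = 0
--     for i in range(row):
--         for j in range(col):
--             if picture[i][j] == 'B':
--                 nr[i] += 1
--                 nc[j] += 1
--     for i in range(row):
--         for j in range(col):
--             if picture[i][j] == 'B':
--                 if nr[i] != N or nc[j] != N: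
--                     continue
--                 currow = picture[i]
--                 f = True
--                 for ii in range(row):
--                     if picture[ii][j] == 'B':
--                         if picture[ii] != currow:
--                             f = False
--                             break
--                 if f:
--                     r += 1
--     return r
-- ===== SOURCE B (Python) =====
-- def findBlackPixel(picture, N):
--     # Group identical rows with a counting dict built once; a pixel qualifies iff
--     # its row has N blacks, its column has N blacks, and its row occurs exactly N times.
--     col = len(picture[0])
--     nc = [0] * col
--     for row in picture:
--         for j in range(col):
--             if row[j] == 'B':
--                 nc[j] += 1
--     cnt = {}
--     for row in picture:
--         key = tuple(row)
--         cnt[key] = cnt.get(key, 0) + 1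
--     res = 0
--     for row in picture:
--         if cnt[tuple(row)] != N:
--             continue
--         if sum(1 for j in range(col) if row[j] == 'B') != N:
--             continue
--         res += sum(1 for j in range(col) if row[j] == 'B' and nc[j] == N)
--     return res
-- ===== Notes on version B (the rewrite author's own statement) =====
-- stated objective: alternative
-- what changed: A checks each qualifying black pixel by rescanning every row of the picture (all rows with a black in that column must equal the current row); B builds a row-multiset counter and column counts once, replacing that inner scan by the equivalent test 'the row occurs exactly N times', one pass per row.
import Mathlib
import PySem

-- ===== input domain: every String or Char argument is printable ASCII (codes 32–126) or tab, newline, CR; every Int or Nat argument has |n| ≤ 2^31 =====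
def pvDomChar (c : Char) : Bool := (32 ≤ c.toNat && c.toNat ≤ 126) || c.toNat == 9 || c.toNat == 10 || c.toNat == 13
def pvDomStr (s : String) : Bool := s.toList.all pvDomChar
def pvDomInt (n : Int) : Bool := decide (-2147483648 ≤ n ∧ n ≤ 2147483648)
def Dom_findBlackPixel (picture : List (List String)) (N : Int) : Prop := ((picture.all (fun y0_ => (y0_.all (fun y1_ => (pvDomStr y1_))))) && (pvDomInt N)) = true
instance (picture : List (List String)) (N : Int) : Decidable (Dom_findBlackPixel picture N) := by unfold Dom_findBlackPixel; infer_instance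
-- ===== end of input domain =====

-- B replaces A's per-pixel scan of all rows by a row-multiset count built once: a black
-- pixel qualifies iff its row has N blacks, its column has N blacks and its row occurs
-- exactly N times (objective: alternative — the per-pixel inner scan of all rows disappears).

-- ===== PORT A =====
-- body of A's first 'for i' loop: the inner 'for j' pass over row i, bumping nr[i] / nc[j]
def aStep (picture : List (List String)) (col : Int) (s : List Int × List Int) (i : Int) :
    List Int × List Int :=
  (PySem.List.pyRange 0 col).foldl (fun (s : List Int × List Int) j =>
    if PySem.List.pyGetD (PySem.List.pyGetD picture i []) j "" = "B" then
      (PySem.List.pySetD s.1 i (PySem.List.pyGetD s.1 i 0 + 1),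
       PySem.List.pySetD s.2 j (PySem.List.pyGetD s.2 j 0 + 1))
    else s) s

-- first nested loop of A: builds nr (blacks per row) and nc (blacks per column)
def aFirst (picture : List (List String)) (row col : Int) : List Int × List Int :=
  (PySem.List.pyRange 0 row).foldl (aStep picture col)
    (List.replicate row.toNat 0, List.replicate col.toNat 0)

-- A's innermost loop: 'f' stays True iff every row with a black in column j equals currow
-- (the Python 'break' only exits early once f is False; the fold keeps f False, same result)
def aAllSame (picture : List (List String)) (row j : Int) (currow : List String) : Bool :=
  (PySem.List.pyRange 0 row).foldl (fun f ii =>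
    if PySem.List.pyGetD (PySem.List.pyGetD picture ii []) j "" = "B" then
      (if PySem.List.pyGetD picture ii [] ≠ currow then false else f)
    else f) true

def findBlackPixel (picture : List (List String)) (N : Int) : Int :=
  let row : Int := PySem.List.len picture
  let col : Int := PySem.List.len ((PySem.List.pyGet? picture 0).getD [])
  let nrnc := aFirst picture row col
  let nr := nrnc.1
  let nc := nrnc.2
  (PySem.List.pyRange 0 row).foldl (fun r i =>
    (PySem.List.pyRange 0 col).foldl (fun r j =>
      if PySem.List.pyGetD (PySem.List.pyGetD picture i []) j "" = "B" then
        if PySem.List.pyGetD nr i 0 ≠ N ∨ PySem.List.pyGetD nc j 0 ≠ N then r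
        else
          if aAllSame picture row j (PySem.List.pyGetD picture i []) then r + 1 else r
      else r) r) 0

-- ===== PORT B =====
-- column black-counts, one pass over the rows
def bNc (picture : List (List String)) (col : Int) : List Int :=
  picture.foldl (fun nc r =>
    (PySem.List.pyRange 0 col).foldl (fun nc j =>
      if PySem.List.pyGetD r j "" = "B" then
        PySem.List.pySetD nc j (PySem.List.pyGetD nc j 0 + 1)
      else nc) nc)
    (List.replicate col.toNat 0)

-- row-multiset counter  cnt[key] = cnt.get(key, 0) + 1
def bCnt (picture : List (List String)) : PySem.Dict (List String) Int :=
  picture.foldl (fun d r => d.insert r (d.getD r 0 + 1)) PySem.Dict.empty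

def findBlackPixel_alt (picture : List (List String)) (N : Int) : Int :=
  let col : Int := PySem.List.len ((PySem.List.pyGet? picture 0).getD [])
  let nc := bNc picture col
  let cnt := bCnt picture
  picture.foldl (fun res r =>
    if cnt.getD r 0 ≠ N then res
    else if ((PySem.List.pyRange 0 col).foldl
        (fun s j => if PySem.List.pyGetD r j "" = "B" then s + 1 else s) (0 : Int)) ≠ N then res
    else res + (PySem.List.pyRange 0 col).foldl
        (fun s j => if PySem.List.pyGetD r j "" = "B" ∧ PySem.List.pyGetD nc j 0 = N then s + 1 else s)
        (0 : Int)) 0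

-- ===== PRECONDITION & SPEC =====
-- Pre_ excludes exactly the inputs where Python A raises IndexError: the empty picture
-- (picture[0]) and pictures with a row shorter than the first row (picture[i][j], j < col).
def Pre_findBlackPixel (picture : List (List String)) (N : Int) : Prop :=
  picture ≠ [] ∧ ∀ r ∈ picture, (picture.headD []).length ≤ r.length

instance (picture : List (List String)) (N : Int) : Decidable (Pre_findBlackPixel picture N) := by
  unfold Pre_findBlackPixel; infer_instance

def pvWitness_findBlackPixel : List (List String) × Int :=
  ([["B", "W"], ["W", "B"]], 1)

def Spec_findBlackPixel (picture : List (List String)) (N : Int) (out : Int) : Prop := out = findBlackPixel_alt picture N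
instance (picture : List (List String)) (N : Int) (out : Int) : Decidable (Spec_findBlackPixel picture N out) := by unfold Spec_findBlackPixel; infer_instance

-- ===== CLAIM (what is proved, stated in full; the proofs are below) =====
def Claim_equal_findBlackPixel : Prop := ∀ (picture : List (List String)) (N : Int), Dom_findBlackPixel picture N → Pre_findBlackPixel picture N → Spec_findBlackPixel picture N (findBlackPixel picture N)

-- ===== LEMMAS AND PROOFS =====

-- the pixel test picture-row r, column j
abbrev bp (r : List String) (j : Int) : Prop := PySem.List.pyGetD r j "" = "B"

-- number of black pixels in column j
def cCnt (pic : List (List String)) (j : Int) : Nat := pic.countP (fun q => decide (bp q j))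

-- number of black pixels in row r (within the first col columns)
def rB (r : List String) (col : Int) : Nat :=
  (PySem.List.pyRange 0 col).countP (fun j => decide (bp r j))

theorem countP_iff {α : Type} (l : List α) (P Q : α → Bool)
    (h : ∀ x ∈ l, Q x → P x) :
    l.countP Q = l.countP P ↔ ∀ x ∈ l, P x → Q x := by
  induction l with
  | nil => simp
  | cons x t ih =>
    have hmono : t.countP Q ≤ t.countP P :=
      List.countP_mono_left (fun y hy hQ => h y (List.mem_cons_of_mem x hy) hQ)
    have ht : t.countP Q = t.countP P ↔ ∀ y ∈ t, P y → Q y :=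
      ih (fun y hy hQ => h y (List.mem_cons_of_mem x hy) hQ)
    have hx : Q x → P x := h x (List.mem_cons_self ..)
    rw [List.countP_cons, List.countP_cons]
    constructor
    · intro heq y hy hP
      rcases List.mem_cons.mp hy with rfl | hyt
      · by_cases hQx : Q y
        · exact hQx
        · exfalso
          simp only [hP, hQx, if_pos, Bool.false_eq_true, if_false] at heq
          omega
      · by_cases hQx : Q x
        · have := hx hQx
          simp only [hQx, this, if_pos] at heq
          exact ht.mp (by omega) y hyt hP
        · by_cases hPx : P x
          · simp only [hQx, hPx, Bool.false_eq_true, if_false, if_pos] at heq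
            omega
          · simp only [hQx, hPx, Bool.false_eq_true, if_false] at heq
            exact ht.mp (by omega) y hyt hP
    · intro hall
      have h1 : t.countP Q = t.countP P :=
        ht.mpr (fun y hy hP => hall y (List.mem_cons_of_mem x hy) hP)
      by_cases hPx : P x
      · have := hall x (List.mem_cons_self ..) hPx
        simp [this, hPx, h1]
      · have hQx : ¬ Q x = true := fun hq => hPx (hx hq)
        simp [hPx, hQx, h1]

theorem crux (pic : List (List String)) (r : List String) (j : Int) (N : Int)
    (hr : r ∈ pic) (hb : bp r j) (hc : (cCnt pic j : Int) = N) :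
    ((pic.count r : Int) = N ↔ ∀ q ∈ pic, bp q j → q = r) := by
  have hQP : ∀ q ∈ pic, (q == r) → decide (bp q j) := by
    intro q _ hq
    have : q = r := by simpa using hq
    subst this
    simpa using hb
  have hkey : pic.countP (· == r) = pic.countP (fun q => decide (bp q j)) ↔
      ∀ q ∈ pic, decide (bp q j) → (q == r) := countP_iff pic _ _ hQP
  rw [← hc]
  rw [List.count]
  rw [Int.natCast_inj]
  constructor
  · intro hEq q hq hbq
    have := hkey.mp (by simpa [cCnt] using hEq) q hq (by simpa using hbq)
    simpa using this
  · intro hall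
    have : ∀ q ∈ pic, decide (bp q j) → (q == r) := by
      intro q hq hd
      simpa using hall q hq (by simpa using hd)
    simpa [cCnt] using hkey.mpr this

theorem getD_pySetD (nc : List Int) (i : Int) (hi : 0 ≤ i) (v : Int) (k : Nat) :
    (PySem.List.pySetD nc i v).getD k 0 =
      if (k : Int) = i ∧ k < nc.length then v else nc.getD k 0 := by
  rw [PySem.List.pySetD_of_nonneg nc v hi]
  rw [List.getD_eq_getElem?_getD, List.getD_eq_getElem?_getD, List.getElem?_set]
  by_cases hk : i.toNat = k
  · have hki : (k : Int) = i := by omega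
    by_cases hlen : k < nc.length
    · simp [hk, hki, hlen]
    · rw [List.getElem?_eq_none (by omega : nc.length ≤ k)]
      simp [hk, hki, hlen]
  · have hki : ¬ ((k : Int) = i) := by omega
    simp [hk, hki]

theorem bumpL (r : List String) (l : List Int) (hl : l.Nodup) (hpos : ∀ x ∈ l, 0 ≤ x)
    (nc : List Int) :
    (l.foldl (fun nc j => if PySem.List.pyGetD r j "" = "B" then
        PySem.List.pySetD nc j (PySem.List.pyGetD nc j 0 + 1) else nc) nc).length = nc.length ∧
    ∀ k : Nat, k < nc.length →
      (l.foldl (fun nc j => if PySem.List.pyGetD r j "" = "B" then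
          PySem.List.pySetD nc j (PySem.List.pyGetD nc j 0 + 1) else nc) nc).getD k 0 =
        nc.getD k 0 + (if (k : Int) ∈ l ∧ bp r (k : Int) then 1 else 0) := by
  induction l generalizing nc with
  | nil => simp
  | cons j t ih =>
    have hj0 : 0 ≤ j := hpos j (List.mem_cons_self ..)
    have hjt : j ∉ t := (List.nodup_cons.mp hl).1
    have htn : t.Nodup := (List.nodup_cons.mp hl).2
    have hpos' : ∀ x ∈ t, 0 ≤ x := fun x hx => hpos x (List.mem_cons_of_mem j hx)
    simp only [List.foldl_cons]
    by_cases hb : PySem.List.pyGetD r j "" = "B"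
    · rw [if_pos hb]
      set nc1 := PySem.List.pySetD nc j (PySem.List.pyGetD nc j 0 + 1) with hnc1
      have hlen1 : nc1.length = nc.length := PySem.List.length_pySetD nc j _
      obtain ⟨ihl, ihg⟩ := ih htn hpos' nc1
      refine ⟨by rw [ihl, hlen1], ?_⟩
      intro k hk
      rw [ihg k (by omega)]
      rw [hnc1, getD_pySetD nc j hj0 _ k]
      by_cases hkj : (k : Int) = j
      · have hbk : bp r (k : Int) := by rw [hkj]; exact hb
        have hknt : (k : Int) ∉ t := by rw [hkj]; exact hjt
        rw [if_pos ⟨hkj, hk⟩, if_neg (by simp [hknt]), if_pos ⟨by simp [hkj], hbk⟩]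
        have : PySem.List.pyGetD nc j 0 = nc.getD k 0 := by
          rw [← hkj, PySem.List.pyGetD_natCast]
        omega
      · rw [if_neg (by simp [hkj])]
        have hmem : ((k : Int) ∈ j :: t ∧ bp r (k : Int)) ↔ ((k : Int) ∈ t ∧ bp r (k : Int)) := by
          simp [List.mem_cons, hkj]
        rw [show (if (k : Int) ∈ j :: t ∧ bp r (k : Int) then (1:Int) else 0) =
            (if (k : Int) ∈ t ∧ bp r (k : Int) then (1:Int) else 0) by
          simp only [hmem]]
    · rw [if_neg hb]
      obtain ⟨ihl, ihg⟩ := ih htn hpos' nc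
      refine ⟨ihl, ?_⟩
      intro k hk
      rw [ihg k hk]
      by_cases hkj : (k : Int) = j
      · have hnb : ¬ bp r (k : Int) := by rw [hkj]; exact hb
        simp [hnb]
      · have hmem : ((k : Int) ∈ j :: t ∧ bp r (k : Int)) ↔ ((k : Int) ∈ t ∧ bp r (k : Int)) := by
          simp [List.mem_cons, hkj]
        rw [show (if (k : Int) ∈ j :: t ∧ bp r (k : Int) then (1:Int) else 0) =
            (if (k : Int) ∈ t ∧ bp r (k : Int) then (1:Int) else 0) by
          simp only [hmem]]

theorem bNc_fold (pic : List (List String)) (col : Int) (nc : List Int) :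
    (pic.foldl (fun nc r => (PySem.List.pyRange 0 col).foldl (fun nc j =>
        if PySem.List.pyGetD r j "" = "B" then
          PySem.List.pySetD nc j (PySem.List.pyGetD nc j 0 + 1) else nc) nc) nc).length = nc.length ∧
    ∀ k : Nat, k < nc.length →
      (pic.foldl (fun nc r => (PySem.List.pyRange 0 col).foldl (fun nc j =>
          if PySem.List.pyGetD r j "" = "B" then
            PySem.List.pySetD nc j (PySem.List.pyGetD nc j 0 + 1) else nc) nc) nc).getD k 0 =
        nc.getD k 0 + (if (k : Int) < col then (cCnt pic (k : Int) : Int) else 0) := by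
  induction pic generalizing nc with
  | nil => simp [cCnt]
  | cons r t ih =>
    simp only [List.foldl_cons]
    have hb := bumpL r (PySem.List.pyRange 0 col) (PySem.List.nodup_pyRange_one 0 col)
      (fun x hx => (PySem.List.mem_pyRange_one.mp hx).1) nc
    obtain ⟨hl1, hg1⟩ := hb
    set nc1 := (PySem.List.pyRange 0 col).foldl (fun nc j =>
        if PySem.List.pyGetD r j "" = "B" then
          PySem.List.pySetD nc j (PySem.List.pyGetD nc j 0 + 1) else nc) nc with hnc1
    obtain ⟨ihl, ihg⟩ := ih nc1
    refine ⟨by rw [ihl, hl1], ?_⟩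
    intro k hk
    rw [ihg k (by omega), hg1 k hk]
    have hcc : cCnt (r :: t) (k : Int) = (if bp r (k : Int) then 1 else 0) + cCnt t (k : Int) := by
      simp only [cCnt, List.countP_cons]
      by_cases h : bp r (k : Int)
      · simp [h]; omega
      · simp [h]
    by_cases hkc : (k : Int) < col
    · have hmem : (k : Int) ∈ PySem.List.pyRange 0 col := PySem.List.mem_pyRange_one.mpr ⟨by omega, hkc⟩
      rw [if_pos hkc, if_pos hkc, hcc]
      by_cases hbk : bp r (k : Int)
      · rw [if_pos ⟨hmem, hbk⟩, if_pos hbk]; push_cast; omega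
      · rw [if_neg (by simp [hbk]), if_neg hbk]; push_cast; omega
    · have hnm : (k : Int) ∉ PySem.List.pyRange 0 col := by
        intro h; exact hkc (PySem.List.mem_pyRange_one.mp h).2
      rw [if_neg hkc, if_neg hkc, if_neg (by simp [hnm])]
      omega

theorem bNc_getD (pic : List (List String)) (col : Int) (hcol : 0 ≤ col)
    (k : Nat) (hk : k < col.toNat) :
    (bNc pic col).getD k 0 = (cCnt pic (k : Int) : Int) := by
  unfold bNc
  obtain ⟨_, hg⟩ := bNc_fold pic col (List.replicate col.toNat 0)
  rw [hg k (by simpa using hk)]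
  have : (List.replicate col.toNat (0:Int)).getD k 0 = 0 := by
    rw [List.getD_eq_getElem?_getD, List.getElem?_replicate, if_pos hk]
    rfl
  rw [this]
  rw [if_pos (by omega)]
  omega

theorem bumpPair (q : List String) (i : Int) (hi : 0 ≤ i) (l : List Int) (hl : l.Nodup)
    (hpos : ∀ x ∈ l, 0 ≤ x) (nr nc : List Int) :
    (l.foldl (fun (s : List Int × List Int) j =>
        if PySem.List.pyGetD q j "" = "B" then
          (PySem.List.pySetD s.1 i (PySem.List.pyGetD s.1 i 0 + 1),
           PySem.List.pySetD s.2 j (PySem.List.pyGetD s.2 j 0 + 1))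
        else s) (nr, nc)).1.length = nr.length ∧
    (l.foldl (fun (s : List Int × List Int) j =>
        if PySem.List.pyGetD q j "" = "B" then
          (PySem.List.pySetD s.1 i (PySem.List.pyGetD s.1 i 0 + 1),
           PySem.List.pySetD s.2 j (PySem.List.pyGetD s.2 j 0 + 1))
        else s) (nr, nc)).2.length = nc.length ∧
    (∀ k : Nat, k < nr.length →
      (l.foldl (fun (s : List Int × List Int) j =>
        if PySem.List.pyGetD q j "" = "B" then
          (PySem.List.pySetD s.1 i (PySem.List.pyGetD s.1 i 0 + 1),
           PySem.List.pySetD s.2 j (PySem.List.pyGetD s.2 j 0 + 1))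
        else s) (nr, nc)).1.getD k 0 =
        nr.getD k 0 + (if (k : Int) = i then (l.countP (fun j => decide (bp q j)) : Int) else 0)) ∧
    (∀ k : Nat, k < nc.length →
      (l.foldl (fun (s : List Int × List Int) j =>
        if PySem.List.pyGetD q j "" = "B" then
          (PySem.List.pySetD s.1 i (PySem.List.pyGetD s.1 i 0 + 1),
           PySem.List.pySetD s.2 j (PySem.List.pyGetD s.2 j 0 + 1))
        else s) (nr, nc)).2.getD k 0 =
        nc.getD k 0 + (if (k : Int) ∈ l ∧ bp q (k : Int) then 1 else 0)) := by
  induction l generalizing nr nc with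
  | nil => simp
  | cons j t ih =>
    have hj0 : 0 ≤ j := hpos j (List.mem_cons_self ..)
    have hjt : j ∉ t := (List.nodup_cons.mp hl).1
    have htn : t.Nodup := (List.nodup_cons.mp hl).2
    have hpos' : ∀ x ∈ t, 0 ≤ x := fun x hx => hpos x (List.mem_cons_of_mem j hx)
    simp only [List.foldl_cons]
    by_cases hb : PySem.List.pyGetD q j "" = "B"
    · rw [if_pos hb]
      set nr1 := PySem.List.pySetD nr i (PySem.List.pyGetD nr i 0 + 1) with hnr1
      set nc1 := PySem.List.pySetD nc j (PySem.List.pyGetD nc j 0 + 1) with hnc1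
      have hlr : nr1.length = nr.length := PySem.List.length_pySetD nr i _
      have hlc : nc1.length = nc.length := PySem.List.length_pySetD nc j _
      obtain ⟨ih1, ih2, ihr, ihc⟩ := ih htn hpos' nr1 nc1
      refine ⟨by rw [ih1, hlr], by rw [ih2, hlc], ?_, ?_⟩
      · intro k hk
        rw [ihr k (by omega)]
        rw [hnr1, getD_pySetD nr i hi _ k]
        rw [List.countP_cons]
        by_cases hki : (k : Int) = i
        · rw [if_pos ⟨hki, hk⟩, if_pos hki, if_pos hki]
          have : PySem.List.pyGetD nr i 0 = nr.getD k 0 := by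
            rw [← hki, PySem.List.pyGetD_natCast]
          rw [this]
          simp only [bp, hb, decide_true, if_pos]
          push_cast
          omega
        · rw [if_neg (by simp [hki]), if_neg hki, if_neg hki]
      · intro k hk
        rw [ihc k (by omega)]
        rw [hnc1, getD_pySetD nc j hj0 _ k]
        by_cases hkj : (k : Int) = j
        · have hbk : bp q (k : Int) := by rw [hkj]; exact hb
          have hknt : (k : Int) ∉ t := by rw [hkj]; exact hjt
          rw [if_pos ⟨hkj, hk⟩, if_neg (by simp [hknt]), if_pos ⟨by simp [hkj], hbk⟩]
          have : PySem.List.pyGetD nc j 0 = nc.getD k 0 := by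
            rw [← hkj, PySem.List.pyGetD_natCast]
          omega
        · rw [if_neg (by simp [hkj])]
          congr 1
          simp [List.mem_cons, hkj]
    · rw [if_neg hb]
      obtain ⟨ih1, ih2, ihr, ihc⟩ := ih htn hpos' nr nc
      refine ⟨ih1, ih2, ?_, ?_⟩
      · intro k hk
        rw [ihr k hk, List.countP_cons]
        simp only [bp, hb, decide_false, Bool.false_eq_true, if_false, add_zero]
      · intro k hk
        rw [ihc k hk]
        by_cases hkj : (k : Int) = j
        · have hnb : ¬ bp q (k : Int) := by rw [hkj]; exact hb
          simp [hnb]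
        · congr 1
          simp [List.mem_cons, hkj]

theorem aFirst_m (pic : List (List String)) (col : Int) (hcol : 0 ≤ col) (m : Nat)
    (hm : m ≤ pic.length) :
    ((PySem.List.pyRange 0 (m : Int)).foldl (aStep pic col)
        (List.replicate pic.length 0, List.replicate col.toNat 0)).1.length = pic.length ∧
    ((PySem.List.pyRange 0 (m : Int)).foldl (aStep pic col)
        (List.replicate pic.length 0, List.replicate col.toNat 0)).2.length = col.toNat ∧
    (∀ k : Nat, k < pic.length →
      ((PySem.List.pyRange 0 (m : Int)).foldl (aStep pic col)
        (List.replicate pic.length 0, List.replicate col.toNat 0)).1.getD k 0 =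
        if k < m then (rB (pic.getD k []) col : Int) else 0) ∧
    (∀ k : Nat, k < col.toNat →
      ((PySem.List.pyRange 0 (m : Int)).foldl (aStep pic col)
        (List.replicate pic.length 0, List.replicate col.toNat 0)).2.getD k 0 =
        (cCnt (pic.take m) (k : Int) : Int)) := by
  induction m with
  | zero =>
    rw [show ((0 : Nat) : Int) = 0 by rfl, PySem.List.pyRange_one_eq_nil (le_refl 0)]
    refine ⟨by simp, by simp, ?_, ?_⟩
    · intro k hk
      simp [List.getD_eq_getElem?_getD, List.getElem?_replicate, hk]
    · intro k hk
      simp [List.getD_eq_getElem?_getD, List.getElem?_replicate, hk, cCnt]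
  | succ m ih =>
    have hm' : m < pic.length := by omega
    obtain ⟨ih1, ih2, ihr, ihc⟩ := ih (by omega)
    rw [show ((m + 1 : Nat) : Int) = (m : Int) + 1 by push_cast; ring]
    rw [PySem.List.pyRange_one_succ_right (by positivity), List.foldl_append, List.foldl_cons,
      List.foldl_nil]
    set S := (PySem.List.pyRange 0 (m : Int)).foldl (aStep pic col)
        (List.replicate pic.length 0, List.replicate col.toNat 0) with hS
    have hstep : aStep pic col S (m : Int) =
        (PySem.List.pyRange 0 col).foldl (fun (s : List Int × List Int) j =>
          if PySem.List.pyGetD (PySem.List.pyGetD pic (m : Int) []) j "" = "B" then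
            (PySem.List.pySetD s.1 (m : Int) (PySem.List.pyGetD s.1 (m : Int) 0 + 1),
             PySem.List.pySetD s.2 j (PySem.List.pyGetD s.2 j 0 + 1))
          else s) (S.1, S.2) := rfl
    rw [hstep]
    obtain ⟨b1, b2, br, bc⟩ := bumpPair (PySem.List.pyGetD pic (m : Int) []) (m : Int)
      (by positivity) (PySem.List.pyRange 0 col) (PySem.List.nodup_pyRange_one 0 col)
      (fun x hx => (PySem.List.mem_pyRange_one.mp hx).1) S.1 S.2
    have hq : PySem.List.pyGetD pic (m : Int) [] = pic.getD m [] := PySem.List.pyGetD_natCast pic m []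
    refine ⟨by rw [b1, ih1], by rw [b2, ih2], ?_, ?_⟩
    · intro k hk
      rw [br k (by rw [ih1]; exact hk), ihr k hk]
      by_cases hkm : (k : Int) = (m : Int)
      · have hkm' : k = m := by omega
        rw [if_pos hkm, if_neg (by omega), if_pos (by omega)]
        rw [hkm', hq]
        show (0:Int) + _ = _
        rw [zero_add]
        rfl
      · rw [if_neg hkm]
        by_cases hklt : k < m
        · rw [if_pos hklt, if_pos (by omega)]
          omega
        · rw [if_neg hklt, if_neg (by omega)]
          omega
    · intro k hk
      rw [bc k (by rw [ih2]; exact hk), ihc k hk]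
      have hkc : (k : Int) < col := by omega
      have hmem : (k : Int) ∈ PySem.List.pyRange 0 col :=
        PySem.List.mem_pyRange_one.mpr ⟨by positivity, hkc⟩
      have htake : pic.take (m + 1) = pic.take m ++ [pic.getD m []] := by
        rw [List.take_succ, List.getElem?_eq_getElem hm']
        simp [List.getD_eq_getElem?_getD, List.getElem?_eq_getElem hm']
      rw [htake]
      simp only [cCnt, List.countP_append, List.countP_cons, List.countP_nil]
      rw [hq]
      by_cases hbk : bp (pic.getD m []) (k : Int)
      · rw [if_pos ⟨hmem, hbk⟩]
        rw [if_pos (by exact_mod_cast (decide_eq_true hbk))]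
        push_cast
        omega
      · rw [if_neg (fun h => hbk h.2)]
        simp only [hbk, decide_false, Bool.false_eq_true, if_false]
        push_cast
        omega

theorem aAllSame_eq (pic : List (List String)) (j : Int) (currow : List String) :
    (aAllSame pic ((pic.length : Nat) : Int) j currow = true) ↔
      (∀ q ∈ pic, bp q j → q = currow) := by
  unfold aAllSame
  rw [PySem.List.foldl_congr_mem _ _
      (fun (f : Bool) ii =>
        if (decide (bp (PySem.List.pyGetD pic ii []) j) &&
            decide (¬ PySem.List.pyGetD pic ii [] = currow)) = true then false else f) true ?_]
  · rw [PySem.List.foldl_if_false_eq]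
    have hmap : (PySem.List.pyRange 0 ((pic.length : Nat) : Int)).any
        (fun ii => decide (bp (PySem.List.pyGetD pic ii []) j) &&
          decide (¬ PySem.List.pyGetD pic ii [] = currow)) =
        pic.any (fun q => decide (bp q j) && decide (¬ q = currow)) := by
      conv_rhs => rw [← PySem.List.map_pyGetD_pyRange_zero' pic []]
      rw [List.any_map]
      rfl
    rw [hmap]
    simp only [Bool.true_and, Bool.not_eq_eq_eq_not, Bool.not_true, List.any_eq_false]
    constructor
    · intro h q hq hbq
      have h2 := h q hq
      simp only [Bool.and_eq_true, decide_eq_true_eq, not_and] at h2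
      exact not_not.mp (h2 hbq)
    · intro h q hq
      by_cases hbq : bp q j
      · simp [h q hq hbq]
      · simp [hbq]
  · intro f ii _
    by_cases h1 : bp (PySem.List.pyGetD pic ii []) j <;>
      by_cases h2 : PySem.List.pyGetD pic ii [] = currow <;> simp [h1, h2, bp]

-- A = nested sum of per-pixel indicators
theorem A_char (pic : List (List String)) (N : Int) :
    findBlackPixel pic N =
      (pic.map (fun r =>
        ((PySem.List.pyRange 0 (PySem.List.len ((PySem.List.pyGet? pic 0).getD []))).map
          (fun j =>
            if bp r j ∧ (rB r (PySem.List.len ((PySem.List.pyGet? pic 0).getD [])) : Int) = N ∧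
                (cCnt pic j : Int) = N ∧ (∀ q ∈ pic, bp q j → q = r) then (1 : Int) else 0)).sum)).sum := by
  simp only [findBlackPixel]
  set col := PySem.List.len ((PySem.List.pyGet? pic 0).getD []) with hcoldef
  have hcol0 : 0 ≤ col := by simp [hcoldef]
  have hrow : PySem.List.len pic = ((pic.length : Nat) : Int) := by simp
  rw [hrow]
  have hAF : aFirst pic ((pic.length : Nat) : Int) col =
      (PySem.List.pyRange 0 ((pic.length : Nat) : Int)).foldl (aStep pic col)
        (List.replicate pic.length 0, List.replicate col.toNat 0) := by
    unfold aFirst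
    rw [Int.toNat_natCast]
  rw [hAF]
  obtain ⟨hL1, hL2, hnr, hnc⟩ := aFirst_m pic col hcol0 pic.length (le_refl _)
  rw [PySem.List.foldl_congr_mem (PySem.List.pyRange 0 ((pic.length : Nat) : Int)) _
      (fun (r : Int) i => r + ((PySem.List.pyRange 0 col).map
        (fun j => if bp (PySem.List.pyGetD pic i []) j ∧
            (rB (PySem.List.pyGetD pic i []) col : Int) = N ∧ (cCnt pic j : Int) = N ∧
            (∀ q ∈ pic, bp q j → q = PySem.List.pyGetD pic i []) then (1 : Int) else 0)).sum) 0 ?_]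
  · rw [PySem.List.foldl_add, zero_add]
    congr 1
    have hmaps : ∀ (G : List String → Int),
        List.map (fun i => G (PySem.List.pyGetD pic i []))
          (PySem.List.pyRange 0 ((pic.length : Nat) : Int)) = pic.map G := by
      intro G
      conv_rhs => rw [← PySem.List.map_pyGetD_pyRange_zero' pic []]
      rw [List.map_map]
      simp only [Function.comp_def]
    exact hmaps (fun r => ((PySem.List.pyRange 0 col).map
      (fun j => if bp r j ∧ (rB r col : Int) = N ∧ (cCnt pic j : Int) = N ∧
        (∀ q ∈ pic, bp q j → q = r) then (1 : Int) else 0)).sum)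
  · intro acc i hi
    obtain ⟨hi0, hilt⟩ := PySem.List.mem_pyRange_one.mp hi
    rw [PySem.List.foldl_congr_mem (PySem.List.pyRange 0 col) _
        (fun (r : Int) j => r + (if bp (PySem.List.pyGetD pic i []) j ∧
            (rB (PySem.List.pyGetD pic i []) col : Int) = N ∧ (cCnt pic j : Int) = N ∧
            (∀ q ∈ pic, bp q j → q = PySem.List.pyGetD pic i []) then (1 : Int) else 0)) acc ?_]
    · rw [PySem.List.foldl_add]
    · intro acc2 j hj
      dsimp only
      obtain ⟨hj0, hjlt⟩ := PySem.List.mem_pyRange_one.mp hj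
      have hiN : i = ((i.toNat : Nat) : Int) := (Int.toNat_of_nonneg hi0).symm
      have hilen : i.toNat < pic.length := by omega
      have hnrv : PySem.List.pyGetD ((PySem.List.pyRange 0 ((pic.length : Nat) : Int)).foldl
          (aStep pic col) (List.replicate pic.length 0, List.replicate col.toNat 0)).1 i 0 =
          ((rB (PySem.List.pyGetD pic i []) col : Nat) : Int) := by
        rw [hiN, PySem.List.pyGetD_natCast, hnr i.toNat hilen, if_pos hilen,
          ← PySem.List.pyGetD_natCast pic i.toNat []]
      have hjN : j = ((j.toNat : Nat) : Int) := (Int.toNat_of_nonneg hj0).symm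
      have hjlen : j.toNat < col.toNat := by omega
      have hncv : PySem.List.pyGetD ((PySem.List.pyRange 0 ((pic.length : Nat) : Int)).foldl
          (aStep pic col) (List.replicate pic.length 0, List.replicate col.toNat 0)).2 j 0 =
          ((cCnt pic j : Nat) : Int) := by
        rw [hjN, PySem.List.pyGetD_natCast, hnc j.toNat hjlen, List.take_length]
      have hflag := aAllSame_eq pic j (PySem.List.pyGetD pic i [])
      rw [hnrv, hncv]
      by_cases hb : bp (PySem.List.pyGetD pic i []) j
      · rw [if_pos hb]
        by_cases h2 : ((rB (PySem.List.pyGetD pic i []) col : Nat) : Int) = N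
        · by_cases h3 : ((cCnt pic j : Nat) : Int) = N
          · rw [if_neg (by simp [h2, h3])]
            by_cases h4 : ∀ q ∈ pic, bp q j → q = PySem.List.pyGetD pic i []
            · rw [if_pos (hflag.mpr h4), if_pos ⟨hb, h2, h3, h4⟩]
            · rw [if_neg (fun hh => h4 (hflag.mp hh)),
                if_neg (fun hh => h4 hh.2.2.2)]
              omega
          · rw [if_pos (Or.inr h3), if_neg (fun hh => h3 hh.2.2.1)]
            omega
        · rw [if_pos (Or.inl h2), if_neg (fun hh => h2 hh.2.1)]
          omega
      · rw [if_neg hb, if_neg (fun hh => hb hh.1)]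
        omega

-- B = sum of per-row contributions
theorem B_char (pic : List (List String)) (N : Int) :
    findBlackPixel_alt pic N =
      (pic.map (fun r =>
        if (pic.count r : Int) = N ∧ (rB r (PySem.List.len ((PySem.List.pyGet? pic 0).getD [])) : Int) = N then
          ((PySem.List.pyRange 0 (PySem.List.len ((PySem.List.pyGet? pic 0).getD []))).map
            (fun j => if bp r j ∧ (cCnt pic j : Int) = N then (1 : Int) else 0)).sum
        else 0)).sum := by
  simp only [findBlackPixel_alt]
  set col := PySem.List.len ((PySem.List.pyGet? pic 0).getD []) with hcoldef
  have hcol0 : 0 ≤ col := by simp [hcoldef]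
  rw [PySem.List.foldl_congr_mem pic _
      (fun (res : Int) r => res + (if (pic.count r : Int) = N ∧ (rB r col : Int) = N then
        ((PySem.List.pyRange 0 col).map
          (fun j => if bp r j ∧ (cCnt pic j : Int) = N then (1 : Int) else 0)).sum
      else 0)) 0 ?_]
  · rw [PySem.List.foldl_add]
    simp
  · intro acc r hr
    have h1 : (bCnt pic).getD r 0 = (pic.count r : Int) := by
      unfold bCnt
      rw [PySem.Dict.getD_foldl_insert_add_one]
      simp
    have h2 : (PySem.List.pyRange 0 col).foldl
        (fun s j => if PySem.List.pyGetD r j "" = "B" then s + 1 else s) (0 : Int) = (rB r col : Int) := by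
      rw [PySem.List.foldl_ite_add_one (fun j => PySem.List.pyGetD r j "" = "B")]
      simp [rB]
    have hcong : ∀ j ∈ PySem.List.pyRange 0 col,
        (decide (bp r j ∧ PySem.List.pyGetD (bNc pic col) j 0 = N)) = true ↔
        (decide (bp r j ∧ (cCnt pic j : Int) = N)) = true := by
      intro j hj
      obtain ⟨hj1, hj2⟩ := PySem.List.mem_pyRange_one.mp hj
      have hjn : j = ((j.toNat : Nat) : Int) := (Int.toNat_of_nonneg hj1).symm
      have hlt : j.toNat < col.toNat := by omega
      rw [hjn, PySem.List.pyGetD_natCast, bNc_getD pic col hcol0 j.toNat hlt]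
    have h3 : (PySem.List.pyRange 0 col).foldl
        (fun s j => if PySem.List.pyGetD r j "" = "B" ∧ PySem.List.pyGetD (bNc pic col) j 0 = N
          then s + 1 else s) (0 : Int) =
        ((PySem.List.pyRange 0 col).map
          (fun j => if bp r j ∧ (cCnt pic j : Int) = N then (1 : Int) else 0)).sum := by
      rw [PySem.List.foldl_ite_add_one
        (fun j => PySem.List.pyGetD r j "" = "B" ∧ PySem.List.pyGetD (bNc pic col) j 0 = N)]
      rw [List.countP_congr hcong]
      rw [← PySem.List.sum_map_ite_one_zero]
      simp
    rw [h1, h2, h3]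
    by_cases hc1 : (pic.count r : Int) = N <;> by_cases hc2 : (rB r col : Int) = N <;>
      simp [hc1, hc2]

-- ===== VERDICT (by name: the statement is the Claim_ definition above) =====
theorem findBlackPixel_spec : Claim_equal_findBlackPixel := by
  intro pic N _ _
  unfold Spec_findBlackPixel
  rw [A_char, B_char]
  apply congrArg
  apply List.map_congr_left
  intro r hr
  by_cases hrB : (rB r (PySem.List.len ((PySem.List.pyGet? pic 0).getD [])) : Int) = N
  · by_cases hcnt : (pic.count r : Int) = N
    · simp only [hcnt, hrB, if_pos trivial, true_and]
      apply congrArg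
      apply List.map_congr_left
      intro j hj
      by_cases hb : bp r j
      · by_cases hc : (cCnt pic j : Int) = N
        · have hall : ∀ q ∈ pic, bp q j → q = r := (crux pic r j N hr hb hc).mp hcnt
          rw [if_pos ⟨hb, hc, hall⟩, if_pos ⟨hb, hc⟩]
        · simp [hc]
      · simp [hb]
    · simp only [hcnt, false_and, if_false]
      apply List.sum_eq_zero
      intro x hx
      simp only [List.mem_map] at hx
      obtain ⟨j, hj, rfl⟩ := hx
      by_cases hb : bp r j
      · by_cases hc : (cCnt pic j : Int) = N
        · have : ¬ (∀ q ∈ pic, bp q j → q = r) := fun hall => hcnt ((crux pic r j N hr hb hc).mpr hall)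
          simp [this]
        · simp [hc]
      · simp [hb]
  · simp only [hrB, false_and]
    simp
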